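-- pv_equiv track=rewrite | github.com/Mac-Adam/Advent_Calendar | day19/day19.py | canBuildInMin
-- ===== SOURCE A (Python) =====
-- def canBuild(resources,cost):
--     can = True
--     for i,c in enumerate(cost):
--         if c>resources[i]:
--             can = False
--     return can
--
-- def canBuildInMin(resources,robots,cost):
--     for i,c in enumerate(cost):
--         if c > 0 and robots[i]==0:
--             return -1
--     tempResources = resources[:]
--     minutes = 0
--     while not canBuild(tempResources,cost):
--         addResources(tempResources,robots)
--         minutes+=1
--     return minutes
--
-- def addResources(resources,robots,min = 1):
--     for i,r in enumerate(robots):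
--         resources[i]+=r*min
-- ===== SOURCE B (Python) =====
-- def canBuildInMin(resources, robots, cost):
--     if any(c > 0 and robots[i] == 0 for i, c in enumerate(cost)):
--         return -1
--     minutes = 0
--     for i, c in enumerate(cost):
--         deficit = c - resources[i]
--         if deficit > 0:
--             minutes = max(minutes, -(-deficit // robots[i]))
--     return minutes
-- ===== Notes on version B (the rewrite author's own statement) =====
-- stated objective: faster
-- what changed: B replaces A's minute-by-minute simulation (repeatedly adding robot output and re-checking affordability) by a single pass taking the maximum over resources of the ceiling division (cost-resources)/robots; intended as faster (a timing run saw A time out where B returned, so no clean ratio was measured).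
-- outside the precondition, e.g. on canBuildInMin([10, 0], [-1, 1], [0, 5]): A returns 5, B returns 5
import Mathlib
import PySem

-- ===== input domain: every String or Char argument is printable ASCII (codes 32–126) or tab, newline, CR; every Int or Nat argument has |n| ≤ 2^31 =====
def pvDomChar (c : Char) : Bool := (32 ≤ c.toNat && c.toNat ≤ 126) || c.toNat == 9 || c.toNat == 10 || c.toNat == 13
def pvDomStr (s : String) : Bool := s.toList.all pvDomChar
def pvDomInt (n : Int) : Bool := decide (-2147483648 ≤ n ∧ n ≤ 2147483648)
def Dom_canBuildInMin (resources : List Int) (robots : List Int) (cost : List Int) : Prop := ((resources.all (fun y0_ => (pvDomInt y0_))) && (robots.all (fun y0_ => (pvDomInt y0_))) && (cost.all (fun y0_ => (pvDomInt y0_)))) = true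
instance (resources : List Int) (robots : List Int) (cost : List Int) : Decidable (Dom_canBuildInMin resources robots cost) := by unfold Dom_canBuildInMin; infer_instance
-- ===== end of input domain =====

-- B replaces A's minute-by-minute simulation loop by a direct single-pass maximum of
-- per-resource ceiling divisions (intended as faster; a timing run saw A time out at
-- n=16 where B returned, so no ratio could be measured); equivalence is proved on Pre_.

-- ===== PORT A =====
-- canBuild(resources, cost): flag loop over enumerate(cost); indexing is in range under Pre_
-- (pyGetD's default is unreachable there).
def canBuildA (resources : List Int) (cost : List Int) : Bool :=
  (PySem.List.enumerate cost).foldl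
    (fun can ic => if ic.2 > PySem.List.pyGetD resources ic.1 0 then false else can) true

-- addResources(resources, robots, min=1): in-place update loop, ported as a fold of functional updates.
def addResourcesA (resources : List Int) (robots : List Int) : List Int :=
  (PySem.List.enumerate robots).foldl
    (fun res ir => PySem.List.pySetD res ir.1 (PySem.List.pyGetD res ir.1 0 + ir.2 * 1)) resources

-- the 'while not canBuild' loop, made total with fuel (unreachable fuel-exhaustion returns minutes);
-- under Pre_ the fuel below suffices, so this is the same computation as Python's while loop.
def goA (cost : List Int) (robots : List Int) : Nat → List Int → Int → Int
  | 0, _, minutes => minutes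
  | fuel + 1, temp, minutes =>
    if canBuildA temp cost then minutes
    else goA cost robots fuel (addResourcesA temp robots) (minutes + 1)

-- fuel bound: one more than the sum of the (clamped) initial deficits, which dominates the
-- number of iterations whenever the Python loop terminates under Pre_.
def fuelA (resources : List Int) (cost : List Int) : Nat :=
  (PySem.List.enumerate cost).foldl
    (fun a ic => a + (ic.2 - PySem.List.pyGetD resources ic.1 0).toNat) 0 + 1

def canBuildInMin (resources : List Int) (robots : List Int) (cost : List Int) : Int :=
  if (PySem.List.enumerate cost).any
      (fun ic => decide (ic.2 > 0) && decide (PySem.List.pyGetD robots ic.1 0 = 0)) then -1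
  else goA cost robots (fuelA resources cost) resources 0

-- ===== PORT B =====
def canBuildInMin_alt (resources : List Int) (robots : List Int) (cost : List Int) : Int :=
  if (PySem.List.enumerate cost).any
      (fun ic => decide (ic.2 > 0) && decide (PySem.List.pyGetD robots ic.1 0 = 0)) then -1
  else
    (PySem.List.enumerate cost).foldl
      (fun minutes ic =>
        let d := ic.2 - PySem.List.pyGetD resources ic.1 0
        if 0 < d then
          max minutes (-(PySem.Int.floordiv (-d) (PySem.List.pyGetD robots ic.1 0)))
        else minutes) 0

-- ===== PRECONDITION & SPEC =====
-- Pre_ = the inputs on which A returns: either the -1 check fires before any missing index is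
-- touched, or every positive cost entry has a robot index and resources covers cost's indices
-- (else IndexError) and either the goods are already affordable (the loop never runs) or the
-- simulation runs, robots' indices all exist in resources (else IndexError in addResources) and
-- every unmet cost entry has a positive robot rate (else the while loop diverges).  In the
-- simulation case Pre_ also restricts to nonnegative robot rates — the function's natural
-- domain; with a negative rate A diverges except in accidental corner cases (see claim cites).
def Pre_canBuildInMin (resources : List Int) (robots : List Int) (cost : List Int) : Prop :=
  (∃ i < min cost.length robots.length, 0 < cost.getD i 0 ∧ robots.getD i 0 = 0) ∨
  (cost.length ≤ resources.length ∧
    (∀ i < cost.length, 0 < cost.getD i 0 → i < robots.length) ∧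
    ((∀ i < cost.length, cost.getD i 0 ≤ resources.getD i 0) ∨
     (robots.length ≤ resources.length ∧
      (∀ i < cost.length, 0 ≤ robots.getD i 0) ∧
      (∀ i < cost.length, cost.getD i 0 ≤ resources.getD i 0 ∨ 0 < robots.getD i 0))))

instance (resources : List Int) (robots : List Int) (cost : List Int) :
    Decidable (Pre_canBuildInMin resources robots cost) := by
  unfold Pre_canBuildInMin; infer_instance

def pvWitness_canBuildInMin : List Int × List Int × List Int := ([1, 0], [1, 1], [2, 2])

def Spec_canBuildInMin (resources : List Int) (robots : List Int) (cost : List Int) (out : Int) : Prop := out = canBuildInMin_alt resources robots cost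
instance (resources : List Int) (robots : List Int) (cost : List Int) (out : Int) : Decidable (Spec_canBuildInMin resources robots cost out) := by unfold Spec_canBuildInMin; infer_instance

-- ===== CLAIM (what is proved, stated in full; the proofs are below) =====
def Claim_equal_canBuildInMin : Prop := ∀ (resources : List Int) (robots : List Int) (cost : List Int), Dom_canBuildInMin resources robots cost → Pre_canBuildInMin resources robots cost → Spec_canBuildInMin resources robots cost (canBuildInMin resources robots cost)

-- ===== LEMMAS AND PROOFS =====

theorem pvWitness_ok :
    Dom_canBuildInMin pvWitness_canBuildInMin.1 pvWitness_canBuildInMin.2.1 pvWitness_canBuildInMin.2.2 ∧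
    Pre_canBuildInMin pvWitness_canBuildInMin.1 pvWitness_canBuildInMin.2.1 pvWitness_canBuildInMin.2.2 := by
  decide

-- a fold of a "set a flag to false" loop is the negation of any
theorem foldl_flag {β : Type} (p : β → Prop) [DecidablePred p] (l : List β) (b : Bool) :
    l.foldl (fun can x => if p x then false else can) b = (b && !l.any (fun x => decide (p x))) := by
  induction l generalizing b with
  | nil => simp
  | cons x xs ih =>
    rw [List.foldl_cons, ih]
    by_cases hq : p x <;> simp [hq]

theorem canBuildA_iff (temp cost : List Int) (h : cost.length ≤ temp.length) :
    canBuildA temp cost = true ↔ ∀ k < cost.length, cost.getD k 0 ≤ temp.getD k 0 := by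
  unfold canBuildA
  rw [foldl_flag (fun ic : Int × Int => ic.2 > PySem.List.pyGetD temp ic.1 0)]
  simp only [Bool.true_and, Bool.not_eq_eq_eq_not, Bool.not_true, List.any_eq_false,
    decide_eq_false_iff_not, PySem.List.mem_enumerate_iff, not_lt]
  constructor
  · intro h k hk
    have := h (0 + (k : Int), cost[k]) ⟨k, hk, rfl⟩
    simpa [List.getD_eq_getElem?_getD, List.getElem?_eq_getElem hk] using this
  · rintro h ic ⟨k, hk, rfl⟩
    have := h k hk
    simpa [List.getD_eq_getElem?_getD, List.getElem?_eq_getElem hk] using this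

theorem addA_general (robots : List Int) :
    ∀ (s : Nat) (temp : List Int), s + robots.length ≤ temp.length →
    ((PySem.List.enumerate robots (s : Int)).foldl
        (fun res ir => PySem.List.pySetD res ir.1 (PySem.List.pyGetD res ir.1 0 + ir.2 * 1)) temp).length = temp.length ∧
    ∀ k : Nat, ((PySem.List.enumerate robots (s : Int)).foldl
        (fun res ir => PySem.List.pySetD res ir.1 (PySem.List.pyGetD res ir.1 0 + ir.2 * 1)) temp).getD k 0
      = if s ≤ k ∧ k < s + robots.length then temp.getD k 0 + robots.getD (k - s) 0
        else temp.getD k 0 := by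
  induction robots with
  | nil =>
    intro s temp h
    refine ⟨by simp [PySem.List.enumerate_nil], ?_⟩
    intro k
    have hno : ¬ (s ≤ k ∧ k < s + ([] : List Int).length) := by simp
    rw [PySem.List.enumerate_nil, List.foldl_nil, if_neg hno]
  | cons r rs ih =>
    intro s temp h
    have hs : s < temp.length := by simp at h; omega
    rw [PySem.List.enumerate_cons, List.foldl_cons]
    simp only [PySem.List.pySetD_natCast, PySem.List.pyGetD_natCast]
    have hcast : (s : Int) + 1 = ((s + 1 : Nat) : Int) := by push_cast; ring
    rw [hcast]
    set temp' := temp.set s (temp.getD s 0 + r * 1) with htemp'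
    have hlen' : temp'.length = temp.length := by simp [htemp']
    obtain ⟨hl, hg⟩ := ih (s + 1) temp' (by rw [hlen']; simp at h ⊢; omega)
    have hts : ∀ j : Nat, temp'.getD j 0 = if j = s then temp.getD s 0 + r * 1 else temp.getD j 0 := by
      intro j
      by_cases hj : j = s
      · subst hj
        simp [htemp', List.getD_eq_getElem?_getD, List.getElem?_set, hs]
      · simp [htemp', List.getD_eq_getElem?_getD, List.getElem?_set, Ne.symm hj, hj]
    refine ⟨by rw [hl, hlen'], ?_⟩
    intro k
    rw [hg k, hts k, show (r :: rs).length = rs.length + 1 from rfl]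
    by_cases hks : k = s
    · subst hks
      rw [if_neg (by omega : ¬ (k + 1 ≤ k ∧ k < k + 1 + rs.length)), if_pos rfl,
        if_pos (by omega : k ≤ k ∧ k < k + (rs.length + 1)), Nat.sub_self, List.getD_cons_zero]
      ring
    · rw [if_neg hks]
      by_cases hin : s + 1 ≤ k ∧ k < s + 1 + rs.length
      · rw [if_pos hin, if_pos (by omega : s ≤ k ∧ k < s + (rs.length + 1)),
          show k - s = (k - (s + 1)) + 1 from by omega, List.getD_cons_succ]
      · rw [if_neg hin, if_neg (by omega : ¬ (s ≤ k ∧ k < s + (rs.length + 1)))]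

theorem addA_length (temp robots : List Int) (h : robots.length ≤ temp.length) :
    (addResourcesA temp robots).length = temp.length := by
  have := (addA_general robots 0 temp (by omega)).1
  simpa [addResourcesA] using this

theorem addA_getD (temp robots : List Int) (h : robots.length ≤ temp.length)
    (k : Nat) (hk : k < robots.length) :
    (addResourcesA temp robots).getD k 0 = temp.getD k 0 + robots.getD k 0 := by
  have := (addA_general robots 0 temp (by omega)).2 k
  have hc : 0 ≤ k ∧ k < 0 + robots.length := by omega
  simp only [hc, if_true] at this
  simpa [addResourcesA] using this

theorem guard_iff (robots cost : List Int) :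
    ((PySem.List.enumerate cost).any
        (fun ic => decide (ic.2 > 0) && decide (PySem.List.pyGetD robots ic.1 0 = 0)) = true)
      ↔ ∃ k < cost.length, 0 < cost.getD k 0 ∧ robots.getD k 0 = 0 := by
  simp only [List.any_eq_true, PySem.List.mem_enumerate_iff _ _ _]
  constructor
  · rintro ⟨ic, ⟨k, hk, rfl⟩, hic⟩
    refine ⟨k, hk, ?_⟩
    simp only [zero_add, PySem.List.pyGetD_natCast, Bool.and_eq_true, decide_eq_true_eq] at hic
    simpa [List.getD_eq_getElem?_getD, List.getElem?_eq_getElem hk] using hic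
  · rintro ⟨k, hk, hc, hr⟩
    refine ⟨(0 + (k : Int), cost[k]), ⟨k, hk, rfl⟩, ?_⟩
    simp only [zero_add, PySem.List.pyGetD_natCast, Bool.and_eq_true, decide_eq_true_eq]
    constructor
    · simpa [List.getD_eq_getElem?_getD, List.getElem?_eq_getElem hk] using hc
    · exact hr
-- ceiling-division brackets for a positive divisor
theorem ceil_mul_ge (d b : Int) (hb : 0 < b) : d ≤ -(PySem.Int.floordiv (-d) b) * b := by
  have h := (PySem.Int.le_floordiv_iff_mul_le (q := PySem.Int.floordiv (-d) b)
    (a := -d) (b := b) hb).mp le_rfl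
  nlinarith
theorem ceil_le_of (d b m : Int) (hb : 0 < b) (hm : d ≤ m * b) :
    -(PySem.Int.floordiv (-d) b) ≤ m := by
  have h := (PySem.Int.le_floordiv_iff_mul_le (q := -m) (a := -d) (b := b) hb).mpr (by nlinarith)
  omega
-- each clamped term is at most the accumulating sum
theorem foldl_add_init {β : Type} (g : β → Nat) (l : List β) (init : Nat) :
    init ≤ l.foldl (fun a y => a + g y) init := by
  induction l generalizing init with
  | nil => simp
  | cons x xs ih => exact le_trans (Nat.le_add_right _ _) (ih (init + g x))
theorem foldl_add_le_mem {β : Type} (g : β → Nat) (l : List β) (init : Nat) :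
    ∀ x ∈ l, g x ≤ l.foldl (fun a y => a + g y) init := by
  induction l generalizing init with
  | nil => simp
  | cons y ys ih =>
    intro x hx
    rcases List.mem_cons.mp hx with rfl | hx
    · exact le_trans (Nat.le_add_left _ _) (foldl_add_init g ys (init + g x))
    · exact ih (init + g y) x hx
-- the three defining properties of B's running maximum
theorem altFold_props (resources robots : List Int) (l : List (Int × Int)) (init : Int) :
    init ≤ l.foldl
        (fun minutes ic =>
          let d := ic.2 - PySem.List.pyGetD resources ic.1 0
          if 0 < d then
            max minutes (-(PySem.Int.floordiv (-d) (PySem.List.pyGetD robots ic.1 0)))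
          else minutes) init ∧
    (∀ ic ∈ l, 0 < ic.2 - PySem.List.pyGetD resources ic.1 0 →
      -(PySem.Int.floordiv (-(ic.2 - PySem.List.pyGetD resources ic.1 0))
          (PySem.List.pyGetD robots ic.1 0)) ≤ l.foldl
        (fun minutes ic =>
          let d := ic.2 - PySem.List.pyGetD resources ic.1 0
          if 0 < d then
            max minutes (-(PySem.Int.floordiv (-d) (PySem.List.pyGetD robots ic.1 0)))
          else minutes) init) ∧
    (∀ M : Int, init ≤ M →
      (∀ ic ∈ l, 0 < ic.2 - PySem.List.pyGetD resources ic.1 0 →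
        -(PySem.Int.floordiv (-(ic.2 - PySem.List.pyGetD resources ic.1 0))
            (PySem.List.pyGetD robots ic.1 0)) ≤ M) →
      l.foldl
        (fun minutes ic =>
          let d := ic.2 - PySem.List.pyGetD resources ic.1 0
          if 0 < d then
            max minutes (-(PySem.Int.floordiv (-d) (PySem.List.pyGetD robots ic.1 0)))
          else minutes) init ≤ M) := by
  induction l generalizing init with
  | nil => exact ⟨le_rfl, by simp, fun M hM _ => by simpa using hM⟩
  | cons x xs ih =>
    simp only [List.foldl_cons]
    set init' := (let d := x.2 - PySem.List.pyGetD resources x.1 0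
      if 0 < d then
        max init (-(PySem.Int.floordiv (-d) (PySem.List.pyGetD robots x.1 0)))
      else init) with hinit'
    have hii : init ≤ init' := by
      rw [hinit']; dsimp only; split_ifs <;> simp
    obtain ⟨ih1, ih2, ih3⟩ := ih init'
    refine ⟨le_trans hii ih1, ?_, ?_⟩
    · intro ic hic hd
      rcases List.mem_cons.mp hic with rfl | hic
      · refine le_trans ?_ ih1
        rw [hinit']; dsimp only; rw [if_pos hd]; exact le_max_right _ _
      · exact ih2 ic hic hd
    · intro M hM hall
      refine ih3 M ?_ (fun ic hic hd => hall ic (List.mem_cons_of_mem _ hic) hd)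
      rw [hinit']; dsimp only
      split_ifs with hd
      · exact max_le hM (hall x (List.mem_cons_self) hd)
      · exact hM
theorem addA_getD_ge (temp robots : List Int) (h : robots.length ≤ temp.length)
    (k : Nat) (hk : robots.length ≤ k) :
    (addResourcesA temp robots).getD k 0 = temp.getD k 0 := by
  have := (addA_general robots 0 temp (by omega)).2 k
  rw [if_neg (by omega)] at this
  simpa [addResourcesA] using this

-- the simulation loop returns the least sufficient minute count L
theorem goA_loop (cost robots resources : List Int)
    (hcr : cost.length ≤ resources.length) (hrr : robots.length ≤ resources.length)
    (L : Int)
    (hPL : ∀ k < cost.length, cost.getD k 0 ≤ resources.getD k 0 + L * robots.getD k 0)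
    (hmin : ∀ m : Int, 0 ≤ m →
      (∀ k < cost.length, cost.getD k 0 ≤ resources.getD k 0 + m * robots.getD k 0) → L ≤ m) :
    ∀ (fuel : Nat) (temp : List Int) (m : Int), temp.length = resources.length →
      (∀ k < cost.length, temp.getD k 0 = resources.getD k 0 + m * robots.getD k 0) →
      0 ≤ m → m ≤ L → (L - m).toNat < fuel →
      goA cost robots fuel temp m = L := by
  intro fuel
  induction fuel with
  | zero => intro temp m _ _ _ _ hf; omega
  | succ f ih =>
    intro temp m hlen hinv hm0 hmL hf
    have hchar := canBuildA_iff temp cost (by omega)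
    by_cases hb : canBuildA temp cost = true
    · have hPm : ∀ k < cost.length,
          cost.getD k 0 ≤ resources.getD k 0 + m * robots.getD k 0 := by
        intro k hk
        have := hchar.mp hb k hk
        rw [hinv k hk] at this
        exact this
      have : L ≤ m := hmin m hm0 hPm
      simp only [goA, hb, if_true]
      omega
    · have hmne : m ≠ L := by
        intro hEq
        exact hb (hchar.mpr (fun k hk => by rw [hinv k hk, hEq]; exact hPL k hk))
      have hmlt : m < L := lt_of_le_of_ne hmL hmne
      simp only [goA, hb, if_false]
      refine ih (addResourcesA temp robots) (m + 1)
        (by rw [addA_length temp robots (by omega)]; exact hlen) ?_ (by omega) (by omega) (by omega)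
      intro k hk
      by_cases hkr : k < robots.length
      · rw [addA_getD temp robots (by omega) k hkr, hinv k hk]
        ring
      · have h0 : robots.getD k 0 = 0 := List.getD_eq_default _ _ (by omega)
        rw [addA_getD_ge temp robots (by omega) k (by omega), hinv k hk, h0]
        ring

-- ===== VERDICT (by name: the statement is the Claim_ definition above) =====
theorem canBuildInMin_spec : Claim_equal_canBuildInMin := by
  intro resources robots cost _ hpre
  unfold Spec_canBuildInMin canBuildInMin canBuildInMin_alt
  by_cases hg : ((PySem.List.enumerate cost).any
      (fun ic => decide (ic.2 > 0) && decide (PySem.List.pyGetD robots ic.1 0 = 0))) = true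
  · rw [if_pos hg, if_pos hg]
  · rw [if_neg hg, if_neg hg]
    obtain ⟨hinit, hmem, hle⟩ :=
      altFold_props resources robots (PySem.List.enumerate cost) 0
    set L := (PySem.List.enumerate cost).foldl
        (fun minutes ic =>
          let d := ic.2 - PySem.List.pyGetD resources ic.1 0
          if 0 < d then
            max minutes (-(PySem.Int.floordiv (-d) (PySem.List.pyGetD robots ic.1 0)))
          else minutes) 0 with hL
    -- index form of membership in enumerate cost
    have hidx : ∀ k (hk : k < cost.length),
        (0 + (k : Int), cost[k]) ∈ PySem.List.enumerate cost := by
      intro k hk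
      exact (PySem.List.mem_enumerate_iff _ _ _).mpr ⟨k, hk, rfl⟩
    have hgetc : ∀ k (hk : k < cost.length), cost[k] = cost.getD k 0 := by
      intro k hk
      simp [List.getD_eq_getElem?_getD, List.getElem?_eq_getElem hk]
    rcases hpre with ⟨i, hi, hci, hri⟩ | ⟨h1, _, hall0 | ⟨hrr, hrob, hmono⟩⟩
    · -- the -1 check would have fired: contradicts the guard being false
      exact absurd ((guard_iff robots cost).mpr ⟨i, by omega, hci, hri⟩) hg
    · -- already affordable: the while loop stops at once and the maximum is 0
      have hA : goA cost robots (fuelA resources cost) resources 0 = 0 := by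
        have : 0 < fuelA resources cost := by unfold fuelA; omega
        obtain ⟨f, hf⟩ : ∃ f, fuelA resources cost = f + 1 := ⟨_, (Nat.succ_pred_eq_of_pos this).symm⟩
        rw [hf]
        simp only [goA, canBuildA_iff resources cost h1 |>.mpr hall0, if_true]
      have hB : L = 0 := by
        refine le_antisymm (hle 0 le_rfl ?_) hinit
        rintro ic hic hd
        obtain ⟨k, hk, rfl⟩ := (PySem.List.mem_enumerate_iff _ _ _).mp hic
        simp only [zero_add, PySem.List.pyGetD_natCast, hgetc k hk] at hd
        exact absurd hd (by have := hall0 k hk; omega)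
      rw [hA]; exact hB.symm
    · -- simulation case: run the loop lemma with enough fuel
      have hrobpos : ∀ k < cost.length,
          0 < cost.getD k 0 - resources.getD k 0 → 0 < robots.getD k 0 := by
        intro k hk hd
        rcases hmono k hk with hc | hr
        · omega
        · exact hr
      -- (F2) L minutes suffice
      have hPL : ∀ k < cost.length,
          cost.getD k 0 ≤ resources.getD k 0 + L * robots.getD k 0 := by
        intro k hk
        by_cases hd : 0 < cost.getD k 0 - resources.getD k 0
        · have hbpos := hrobpos k hk hd
          have h3 := hmem (0 + (k : Int), cost[k]) (hidx k hk)
          simp only [zero_add, PySem.List.pyGetD_natCast, hgetc k hk] at h3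
          have hceil := h3 hd
          have := ceil_mul_ge (cost.getD k 0 - resources.getD k 0) (robots.getD k 0) hbpos
          nlinarith
        · have hLnn : 0 ≤ L := hinit
          nlinarith [hrob k hk]
      -- (F3) L is minimal among sufficient minute counts
      have hmin : ∀ m : Int, 0 ≤ m →
          (∀ k < cost.length, cost.getD k 0 ≤ resources.getD k 0 + m * robots.getD k 0) →
          L ≤ m := by
        intro m hm0 hPm
        refine hle m hm0 ?_
        rintro ic hic hd
        obtain ⟨k, hk, rfl⟩ := (PySem.List.mem_enumerate_iff _ _ _).mp hic
        simp only [zero_add, PySem.List.pyGetD_natCast, hgetc k hk] at hd ⊢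
        exact ceil_le_of _ _ m (hrobpos k hk hd) (by have := hPm k hk; nlinarith)
      set S := (PySem.List.enumerate cost).foldl
          (fun a ic => a + (ic.2 - PySem.List.pyGetD resources ic.1 0).toNat) 0 with hSdef
      have hS : ∀ k < cost.length,
          (cost.getD k 0 - resources.getD k 0).toNat ≤ S := by
        intro k hk
        have := foldl_add_le_mem (fun ic : Int × Int =>
            (ic.2 - PySem.List.pyGetD resources ic.1 0).toNat)
          (PySem.List.enumerate cost) 0 (0 + (k : Int), cost[k]) (hidx k hk)
        simpa only [zero_add, PySem.List.pyGetD_natCast, hgetc k hk, ← hSdef] using this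
      have hLS : L ≤ (S : Int) := by
        refine hle _ (Int.natCast_nonneg S) ?_
        rintro ic hic hd
        obtain ⟨k, hk, rfl⟩ := (PySem.List.mem_enumerate_iff _ _ _).mp hic
        simp only [zero_add, PySem.List.pyGetD_natCast, hgetc k hk] at hd ⊢
        have hbpos := hrobpos k hk hd
        have h4 := hS k hk
        refine le_trans (ceil_le_of _ _ (cost.getD k 0 - resources.getD k 0) hbpos (by nlinarith)) ?_
        omega
      have hfuel : fuelA resources cost = S + 1 := by unfold fuelA; rw [hSdef]
      refine goA_loop cost robots resources h1 hrr L hPL hmin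
        (fuelA resources cost) resources 0 rfl (fun k hk => by ring) le_rfl hinit ?_
      omega
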